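-- pv_equiv track=rewrite | github.com/qvizt/HackerRank-Solutions-Java | Python/Algorithms/Strings/Weighted Uniform Strings.py | get_set_of_weights
-- ===== SOURCE A (Python) =====
-- def get_set_of_weights(uniform_string):
--     set_weights = set()
--     prev_read_char = None
--     sum = 0
--
--     for i in range(0, len(uniform_string)):
--         c = uniform_string[i]
--         weight = ord(c) - 96
--         if c == prev_read_char:
--             sum = sum + weight
--         else:
--             sum = weight
--         prev_read_char = c
--         set_weights.add(sum)
--
--     return set_weights
-- ===== SOURCE B (Python) =====
-- def get_set_of_weights(uniform_string):
--     # Run-length decomposition: for each maximal run of a character c of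
--     # length L, its uniform substrings weigh k*(ord(c)-96) for k = 1..L.
--     result = set()
--     chars = list(uniform_string)
--     while chars:
--         c = chars[0]
--         run_len = 0
--         while run_len < len(chars) and chars[run_len] == c:
--             run_len += 1
--         w = ord(c) - 96
--         for k in range(1, run_len + 1):
--             result.add(k * w)
--         chars = chars[run_len:]
--     return result
-- ===== Notes on version B (the rewrite author's own statement) =====
-- stated objective: alternative
-- what changed: Replaces the flat single pass with prev-char/running-sum state by an outer loop over maximal runs of equal characters and an inner loop adding the multiples k*w for k = 1..run length.
import Mathlib
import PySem

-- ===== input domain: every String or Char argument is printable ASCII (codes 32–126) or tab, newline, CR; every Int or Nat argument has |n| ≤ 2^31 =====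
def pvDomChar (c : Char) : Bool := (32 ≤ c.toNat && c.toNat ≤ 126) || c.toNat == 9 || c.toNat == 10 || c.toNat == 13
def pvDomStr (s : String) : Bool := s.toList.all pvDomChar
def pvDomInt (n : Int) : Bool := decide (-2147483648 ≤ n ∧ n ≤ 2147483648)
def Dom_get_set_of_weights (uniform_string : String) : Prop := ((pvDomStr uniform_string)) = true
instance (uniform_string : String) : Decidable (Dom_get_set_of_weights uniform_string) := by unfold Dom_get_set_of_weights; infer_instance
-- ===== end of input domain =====

-- B replaces A's single pass with prev-char tracking by an outer loop over maximal
-- runs of equal characters with an inner loop over the multiples (alternative decomposition).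

-- ===== PORT A =====
-- state: (set_weights, prev_read_char, sum); one step per character, as in A's loop
def pvAStep (st : PySem.Set Int × Option Char × Int) (c : Char) :
    PySem.Set Int × Option Char × Int :=
  let weight : Int := (c.toNat : Int) - 96
  let sum := if some c == st.2.1 then st.2.2 + weight else weight
  (PySem.Set.add st.1 sum, some c, sum)

def get_set_of_weights (uniform_string : String) : List Int :=
  (uniform_string.toList.foldl pvAStep (PySem.Set.empty, none, 0)).1

-- ===== PORT B =====
-- outer loop over maximal runs (inner while = takeWhile), inner loop over k = 1..run_len
def pvBGo (chars : List Char) (result : PySem.Set Int) : PySem.Set Int :=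
  match chars with
  | [] => result
  | c :: rest =>
    let runLen := 1 + (rest.takeWhile (fun d => d == c)).length
    let w : Int := (c.toNat : Int) - 96
    let result' := (List.range' 1 runLen).foldl
        (fun a k => PySem.Set.add a ((k : Int) * w)) result
    pvBGo (rest.dropWhile (fun d => d == c)) result'
termination_by chars.length
decreasing_by
  simp only [List.length_cons]
  exact Nat.lt_succ_of_le (List.length_dropWhile_le _ _)

def get_set_of_weights_alt (uniform_string : String) : List Int :=
  pvBGo uniform_string.toList PySem.Set.empty

-- ===== PRECONDITION & SPEC =====
def Spec_get_set_of_weights (uniform_string : String) (out : List Int) : Prop := out = get_set_of_weights_alt uniform_string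
instance (uniform_string : String) (out : List Int) : Decidable (Spec_get_set_of_weights uniform_string out) := by unfold Spec_get_set_of_weights; infer_instance

-- ===== CLAIM (what is proved, stated in full; the proofs are below) =====
def Claim_equal_get_set_of_weights : Prop := ∀ (uniform_string : String), Dom_get_set_of_weights uniform_string → Spec_get_set_of_weights uniform_string (get_set_of_weights uniform_string)

-- ===== LEMMAS AND PROOFS =====

-- A's fold over a run of j-indexed copies of c adds (j+1)*w, …, (j+len)*w, matching B's inner loop
lemma pvRunLemma (c : Char) (run rest2 : List Char)
    (hrun : ∀ d ∈ run, d = c) (acc : PySem.Set Int) (j : Nat) :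
    (run ++ rest2).foldl pvAStep (acc, some c, (j : Int) * ((c.toNat : Int) - 96))
    = rest2.foldl pvAStep
        ((List.range' (j + 1) run.length).foldl
            (fun a k => PySem.Set.add a ((k : Int) * ((c.toNat : Int) - 96))) acc,
         some c, ((j + run.length : Nat) : Int) * ((c.toNat : Int) - 96)) := by
  induction run generalizing acc j with
  | nil => simp
  | cons d tl ih =>
    have hd : d = c := hrun d (by simp)
    subst hd
    have hstep : pvAStep (acc, some d, (j : Int) * ((d.toNat : Int) - 96)) d
        = (PySem.Set.add acc (((j + 1 : Nat) : Int) * ((d.toNat : Int) - 96)), some d,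
           ((j + 1 : Nat) : Int) * ((d.toNat : Int) - 96)) := by
      simp only [pvAStep, BEq.rfl, if_pos]
      push_cast; ring_nf
    rw [List.cons_append, List.foldl_cons, hstep,
        ih (fun e he => hrun e (by simp [he])) _ (j + 1)]
    simp only [List.length_cons, List.range'_succ]
    norm_num [Nat.add_comm, Nat.add_assoc, Nat.add_left_comm]

-- main invariant: from any state whose prev does not match the next character,
-- A's remaining fold computes B's run recursion
lemma pvMainLemma (cs : List Char) (acc : PySem.Set Int) (prev : Option Char) (sum : Int)
    (hprev : ∀ c rest, cs = c :: rest → (some c == prev) = false) :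
    (cs.foldl pvAStep (acc, prev, sum)).1 = pvBGo cs acc := by
  induction cs, acc using pvBGo.induct generalizing prev sum with
  | case1 _ => simp [pvBGo]
  | case2 acc c rest runLen w result' ih =>
    have hdec := List.takeWhile_append_dropWhile (p := fun d => d == c) (l := rest)
    have hstep : pvAStep (acc, prev, sum) c
        = (PySem.Set.add acc (((1 : Nat) : Int) * ((c.toNat : Int) - 96)), some c,
           ((1 : Nat) : Int) * ((c.toNat : Int) - 96)) := by
      simp only [pvAStep, hprev c rest rfl, if_neg, Bool.false_eq_true, not_false_iff]
      ring_nf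
    rw [List.foldl_cons, hstep, ← hdec,
        pvRunLemma c _ _ (fun d hd => eq_of_beq (List.mem_takeWhile_imp (p := fun d => d == c) hd)) _ 1]
    conv_rhs => rw [hdec]
    rw [pvBGo]
    have hne : ∀ d rest₁, List.dropWhile (fun d => d == c) rest = d :: rest₁ →
        (some d == some c) = false := by
      intro d rest₁ hd
      have hnil : List.dropWhile (fun d => d == c) rest ≠ [] := by rw [hd]; simp
      have hh := List.head_dropWhile_not (fun d => d == c) hnil
      have : (List.dropWhile (fun d => d == c) rest).head hnil = d := by
        simp [hd]
      rw [this] at hh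
      simpa using hh
    have hset : (List.range' (1 + 1) (List.takeWhile (fun d => d == c) rest).length).foldl
          (fun a k => PySem.Set.add a ((k : Int) * ((c.toNat : Int) - 96)))
          (PySem.Set.add acc (((1 : Nat) : Int) * ((c.toNat : Int) - 96)))
        = (List.range' 1 (1 + (List.takeWhile (fun d => d == c) rest).length)).foldl
          (fun a k => PySem.Set.add a ((k : Int) * ((c.toNat : Int) - 96))) acc := by
      rw [Nat.add_comm 1 (List.takeWhile (fun d => d == c) rest).length, List.range'_succ]
      simp
    rw [hset]
    exact ih (some c) _ hne

-- ===== VERDICT (by name: the statement is the Claim_ definition above) =====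
theorem get_set_of_weights_spec : Claim_equal_get_set_of_weights := by
  intro s _
  unfold Spec_get_set_of_weights get_set_of_weights get_set_of_weights_alt
  exact pvMainLemma _ _ _ _ (fun c rest h => by simp)
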